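-- pv_equiv track=rewrite | github.com/NikitaVoitov/snowflake-native-splunk-app | tests/integration/conftest.py | _collector_span_blocks
-- ===== SOURCE A (Python) =====
-- def _collector_span_blocks(journal_excerpt: str) -> list[list[str]]:
--     """Split a collector excerpt into individual span blocks."""
--     blocks: list[list[str]] = []
--     current: list[str] | None = None
--
--     for line in journal_excerpt.splitlines():
--         if "]: Span #" in line:
--             if current:
--                 blocks.append(current)
--             current = [line]
--             continue
--
--         if current is not None:
--             if "]: ResourceSpans #" in line:
--                 blocks.append(current)
--                 current = None
--                 continue
--             current.append(line)
--
--     if current: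
--         blocks.append(current)
--     return blocks
-- ===== SOURCE B (Python) =====
-- def _take_until_marker(lines):
--     out = []
--     for l in lines:
--         if "]: Span #" in l or "]: ResourceSpans #" in l:
--             break
--         out.append(l)
--     return out
--
--
-- def _collector_span_blocks(journal_excerpt: str) -> list[list[str]]:
--     """Split a collector excerpt into individual span blocks."""
--     lines = journal_excerpt.splitlines()
--     starts = [(i, l) for i, l in enumerate(lines) if "]: Span #" in l]
--     return [[l] + _take_until_marker(lines[i + 1:]) for i, l in starts]
-- ===== Notes on version B (the rewrite author's own statement) =====
-- stated objective: alternative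
-- what changed: Replaces A's single stateful pass with an optional pending-block accumulator by a two-phase decomposition: first collect all Span-start lines via enumerate, then build each block independently by scanning forward from its start until the next Span/ResourceSpans marker.
import Mathlib
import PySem

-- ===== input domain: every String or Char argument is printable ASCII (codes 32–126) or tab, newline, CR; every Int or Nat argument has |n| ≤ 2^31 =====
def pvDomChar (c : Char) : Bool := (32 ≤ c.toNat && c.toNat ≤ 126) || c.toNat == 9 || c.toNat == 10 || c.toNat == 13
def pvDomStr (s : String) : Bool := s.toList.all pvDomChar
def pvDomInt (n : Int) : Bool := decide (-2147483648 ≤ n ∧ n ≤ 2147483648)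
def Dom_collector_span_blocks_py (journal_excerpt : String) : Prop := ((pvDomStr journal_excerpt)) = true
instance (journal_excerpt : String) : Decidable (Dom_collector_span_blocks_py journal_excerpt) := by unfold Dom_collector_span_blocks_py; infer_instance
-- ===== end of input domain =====

-- B replaces A's single stateful accumulator loop by collecting the Span-start
-- positions first and building each block with an independent forward scan
-- (objective: alternative decomposition, same O(n) cost per character).

-- ===== PORT A =====
-- one iteration of A's loop over (blocks, current)
def stepA (acc : List (List String) × Option (List String)) (line : String) :
    List (List String) × Option (List String) :=
  if PySem.Str.isIn "]: Span #" line then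
    ((match acc.2 with
      | some c => if c = [] then acc.1 else acc.1 ++ [c]   -- "if current:" truthiness
      | none => acc.1), some [line])
  else
    match acc.2 with
    | some c =>
      if PySem.Str.isIn "]: ResourceSpans #" line then (acc.1 ++ [c], none)
      else (acc.1, some (c ++ [line]))
    | none => (acc.1, none)

-- the trailing "if current: blocks.append(current)"
def finishA (st : List (List String) × Option (List String)) : List (List String) :=
  match st.2 with
  | some c => if c = [] then st.1 else st.1 ++ [c]
  | none => st.1

def collector_span_blocks_py (journal_excerpt : String) : List (List String) :=
  finishA ((PySem.Str.splitlines journal_excerpt).foldl stepA ([], none))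

-- ===== PORT B =====
-- Source B's _take_until_marker helper
def takeUntilMarker : List String → List String
  | [] => []
  | l :: ls =>
    if PySem.Str.isIn "]: Span #" l || PySem.Str.isIn "]: ResourceSpans #" l then []
    else l :: takeUntilMarker ls

def collector_span_blocks_py_alt (journal_excerpt : String) : List (List String) :=
  let lines := PySem.Str.splitlines journal_excerpt
  let starts := (PySem.List.enumerate lines 0).filter (fun p => PySem.Str.isIn "]: Span #" p.2)
  starts.map (fun p => [p.2] ++ takeUntilMarker (PySem.List.slice lines (some (p.1 + 1)) none))

-- ===== PRECONDITION & SPEC =====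
def Spec_collector_span_blocks_py (journal_excerpt : String) (out : List (List String)) : Prop := out = collector_span_blocks_py_alt journal_excerpt
instance (journal_excerpt : String) (out : List (List String)) : Decidable (Spec_collector_span_blocks_py journal_excerpt out) := by unfold Spec_collector_span_blocks_py; infer_instance

-- ===== CLAIM (what is proved, stated in full; the proofs are below) =====
def Claim_equal_collector_span_blocks_py : Prop := ∀ (journal_excerpt : String), Dom_collector_span_blocks_py journal_excerpt → Spec_collector_span_blocks_py journal_excerpt (collector_span_blocks_py journal_excerpt)

-- ===== LEMMAS AND PROOFS =====

-- canonical recursive description of the span blocks of a line list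
def gBlocks : List String → List (List String)
  | [] => []
  | l :: ls =>
    if PySem.Str.isIn "]: Span #" l then (l :: takeUntilMarker ls) :: gBlocks ls
    else gBlocks ls

def notStop (l : String) : Bool :=
  !(PySem.Str.isIn "]: Span #" l || PySem.Str.isIn "]: ResourceSpans #" l)


-- lines dropped by `dropWhile notStop` are not Span starts, so gBlocks ignores them
theorem gBlocks_dropWhile (ls : List String) :
    gBlocks (ls.dropWhile notStop) = gBlocks ls := by
  induction ls with
  | nil => rfl
  | cons l ls ih =>
    by_cases h : notStop l = true
    · have hs : PySem.Chars.isIn [']',':',' ','S','p','a','n',' ','#'] l.toList = false := by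
        simp [notStop] at h; exact_mod_cast h.1
      simp [List.dropWhile, h, gBlocks, hs, ih]
    · simp at h
      simp [List.dropWhile, h, gBlocks]

-- meaning of A's pending accumulator
def hPend : Option (List String) → List String → List (List String)
  | none, ls => gBlocks ls
  | some c, ls => (c ++ takeUntilMarker ls) :: gBlocks (ls.dropWhile notStop)

theorem loopA_eq (ls : List String) (blocks : List (List String))
    (c : Option (List String)) (hc : ∀ c', c = some c' → c' ≠ []) :
    finishA (ls.foldl stepA (blocks, c)) = blocks ++ hPend c ls := by
  induction ls generalizing blocks c with
  | nil =>
    cases c with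
    | none => simp [finishA, hPend, gBlocks]
    | some c' =>
      have hne := hc c' rfl
      simp [finishA, hPend, hne, takeUntilMarker, gBlocks]
  | cons l ls ih =>
    by_cases hspan : PySem.Chars.isIn [']',':',' ','S','p','a','n',' ','#'] l.toList = true
    case pos =>
      cases c with
      | none =>
        have hstep : stepA (blocks, none) l = (blocks, some [l]) := by
          simp [stepA, hspan]
        simp only [List.foldl_cons, hstep]
        rw [ih blocks (some [l]) (by intro x h; cases h; simp)]
        simp [hPend, gBlocks, hspan, gBlocks_dropWhile]
      | some c' =>
        have hne := hc c' rfl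
        have hstep : stepA (blocks, some c') l = (blocks ++ [c'], some [l]) := by
          simp [stepA, hspan, hne]
        simp only [List.foldl_cons, hstep]
        rw [ih (blocks ++ [c']) (some [l]) (by intro x h; cases h; simp)]
        have ht : takeUntilMarker (l :: ls) = [] := by simp [takeUntilMarker, hspan]
        have hdw : (l :: ls).dropWhile notStop = l :: ls := by
          simp [List.dropWhile, notStop, hspan]
        simp [hPend, hdw, gBlocks, hspan, takeUntilMarker, gBlocks_dropWhile]
    case neg =>
      simp only [Bool.not_eq_true] at hspan
      cases c with
      | none =>
        have hstep : stepA (blocks, none) l = (blocks, none) := by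
          simp [stepA, hspan]
        simp only [List.foldl_cons, hstep]
        rw [ih blocks none (by intro x h; cases h)]
        simp [hPend, gBlocks, hspan]
      | some c' =>
        have hne := hc c' rfl
        by_cases hres : PySem.Chars.isIn [']',':',' ','R','e','s','o','u','r','c','e','S','p','a','n','s',' ','#'] l.toList = true
        · have hstep : stepA (blocks, some c') l = (blocks ++ [c'], none) := by
            simp [stepA, hspan, hres]
          simp only [List.foldl_cons, hstep]
          rw [ih (blocks ++ [c']) none (by intro x h; cases h)]
          have ht : takeUntilMarker (l :: ls) = [] := by simp [takeUntilMarker, hspan, hres]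
          have hdw : (l :: ls).dropWhile notStop = l :: ls := by
            simp [List.dropWhile, notStop, hspan, hres]
          simp [hPend, ht, hdw, gBlocks, hspan]
        · simp only [Bool.not_eq_true] at hres
          have hstep : stepA (blocks, some c') l = (blocks, some (c' ++ [l])) := by
            simp [stepA, hspan, hres]
          simp only [List.foldl_cons, hstep]
          rw [ih blocks (some (c' ++ [l])) (by intro x h; cases h; simp)]
          have ht : takeUntilMarker (l :: ls) = l :: takeUntilMarker ls := by
            simp [takeUntilMarker, hspan, hres]
          have hdw : (l :: ls).dropWhile notStop = ls.dropWhile notStop := by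
            simp [List.dropWhile, notStop, hspan, hres]
          simp [hPend, ht, hdw]

theorem bCore_eq (suf : List String) :
    ∀ (n : Nat) (lines : List String), lines.drop n = suf →
    ((PySem.List.enumerate suf (n : Int)).filter
        (fun p => PySem.Str.isIn "]: Span #" p.2)).map
      (fun p => [p.2] ++ takeUntilMarker (PySem.List.slice lines (some (p.1 + 1)) none))
      = gBlocks suf := by
  induction suf with
  | nil => intro n lines h; simp [PySem.List.enumerate_nil, gBlocks]
  | cons l ls ih =>
    intro n lines h
    have hdrop : lines.drop (n + 1) = ls := by
      rw [← List.drop_drop, h]; rfl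
    have hslice : PySem.List.slice lines (some ((n : Int) + 1)) none = ls := by
      have hc : ((n : Int) + 1) = ((n + 1 : Nat) : Int) := by push_cast; ring
      rw [hc, PySem.List.slice_from_natCast, hdrop]
    have hcast : (n : Int) + 1 = ((n + 1 : Nat) : Int) := by push_cast; ring
    have hih := ih (n + 1) lines hdrop
    rw [PySem.List.enumerate_cons]
    by_cases hspan : PySem.Chars.isIn [']',':',' ','S','p','a','n',' ','#'] l.toList = true
    · rw [List.filter_cons_of_pos (by exact_mod_cast hspan)]
      rw [List.map_cons, hcast, hih]
      simp only [gBlocks]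
      rw [if_pos (by exact_mod_cast hspan)]
      rw [← hcast, hslice]
      rfl
    · simp only [Bool.not_eq_true] at hspan
      rw [List.filter_cons_of_neg (by simp [hspan])]
      rw [hcast, hih]
      simp [gBlocks, hspan]

-- ===== VERDICT (by name: the statement is the Claim_ definition above) =====
theorem collector_span_blocks_py_spec : Claim_equal_collector_span_blocks_py := by
  intro s _
  show collector_span_blocks_py s = collector_span_blocks_py_alt s
  unfold collector_span_blocks_py collector_span_blocks_py_alt
  rw [loopA_eq _ _ none (by intro c' h; cases h)]
  have hb := bCore_eq (PySem.Str.splitlines s) 0 (PySem.Str.splitlines s) (by simp)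
  simp only [Int.natCast_zero] at hb
  rw [hb]
  rfl
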